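-- pv_equiv track=rewrite | github.com/azuda/ISSP_TRIUMF_2023 | new files/static_objects.py | cell_gaps
-- ===== SOURCE A (Python) =====
-- def cell_gaps(foil_quantity):
--     '''this function will format the cell gaps by calling a function and doing some math'''
--     ###This function will need to format data to look like lines 39 to 49 by generating gaps based
--     ###on how many foils we are creating, this math should look something like target_container - consumed_space_from_foils / foil_quantity + 1
--     first_cell_gap = {
--         'row' : 5, ## 3 static cells come before this row
--         's1' : -1, ## I don't remember what this surface is???? belwow top of
--         's2' : 12, ##to the right of the end cap
--         's3' : -13, ##to the left of the second foil
--         's4' : -8, ## below foil cut surface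
--         's5' : 0 ## this isn't used but it's there
--     }
--     cell_gaps = '4\t-1\t9\t-11\t-8\t0\t\t\t\t\t\t\t\t\t' ## these are the metrics for row 4 which indicates to the right of the first end cap, left of the second foil       #**** Later this needs to be altered to include the cap + foil
--     count = 5
--     for gap in range(1,foil_quantity):
--         cell_gaps += f'\n{first_cell_gap["row"]}\t{first_cell_gap["s1"]}\t{first_cell_gap["s2"]}\t{first_cell_gap["s3"]}\t{first_cell_gap["s4"]}\t{first_cell_gap["s5"]}\t\t\t\t\t\t\t\t\t'
--         first_cell_gap["row"] = first_cell_gap["row"] + 1 # This increments the row of each cell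
--         first_cell_gap["s2"] = first_cell_gap["s2"] + 2 # This increments the surfaces to represent the foils
--         first_cell_gap["s3"] = first_cell_gap["s3"] - 2 # This increments the surfraces to represent the foils
--         count += 1
--     # There should be one final row to the cell gaps added but im not quite sure what that line should look like right now
--     return cell_gaps
-- ===== SOURCE B (Python) =====
-- def cell_gaps(foil_quantity):
--     lines = ['4\t-1\t9\t-11\t-8\t0' + '\t' * 9]
--     lines += [f'{4 + i}\t-1\t{10 + 2 * i}\t{-11 - 2 * i}\t-8\t0' + '\t' * 9
--               for i in range(1, foil_quantity)]
--     return '\n'.join(lines)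
-- ===== Notes on version B (the rewrite author's own statement) =====
-- stated objective: simpler
-- what changed: Replaces A's loop that mutates a dict and a string accumulator (plus a dead count variable) with a closed-form comprehension over the gap index, each line computed directly from the index, joined with ' '.
import Mathlib
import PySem

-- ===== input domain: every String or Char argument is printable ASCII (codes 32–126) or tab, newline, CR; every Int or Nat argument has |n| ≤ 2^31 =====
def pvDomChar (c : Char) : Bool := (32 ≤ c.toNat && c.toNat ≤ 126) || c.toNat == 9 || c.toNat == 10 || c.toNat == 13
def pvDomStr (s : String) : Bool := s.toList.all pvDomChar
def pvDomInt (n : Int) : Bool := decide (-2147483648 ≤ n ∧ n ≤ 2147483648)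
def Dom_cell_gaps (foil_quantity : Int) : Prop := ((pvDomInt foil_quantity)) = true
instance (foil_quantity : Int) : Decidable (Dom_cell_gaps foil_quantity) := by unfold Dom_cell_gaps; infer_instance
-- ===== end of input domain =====

-- B replaces A's mutable-dict accumulator loop (and dead `count`) by a closed-form
-- comprehension over the gap index joined with '\n' (objective: simpler).

-- ===== PORT A =====
-- one loop iteration: append the f-string line read from the dict, then bump row/s2/s3 and count
-- (the dict lookups d["row"], … always succeed in A, so KeyError is unreachable; getD … 0 is exact here)
def cellGapsStep (st : PySem.Dict String Int × String × Int) (_gap : Int) :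
    PySem.Dict String Int × String × Int :=
  let d := st.1
  let s := st.2.1 ++ ("\n" ++ PySem.Int.toStr (d.getD "row" 0) ++ "\t" ++ PySem.Int.toStr (d.getD "s1" 0)
      ++ "\t" ++ PySem.Int.toStr (d.getD "s2" 0) ++ "\t" ++ PySem.Int.toStr (d.getD "s3" 0)
      ++ "\t" ++ PySem.Int.toStr (d.getD "s4" 0) ++ "\t" ++ PySem.Int.toStr (d.getD "s5" 0)
      ++ "\t\t\t\t\t\t\t\t\t")
  let d := d.insert "row" (d.getD "row" 0 + 1)
  let d := d.insert "s2" (d.getD "s2" 0 + 2)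
  let d := d.insert "s3" (d.getD "s3" 0 - 2)
  (d, s, st.2.2 + 1)

def cell_gaps (foil_quantity : Int) : String :=
  let first_cell_gap := ((((((PySem.Dict.empty : PySem.Dict String Int).insert "row" 5).insert
      "s1" (-1)).insert "s2" 12).insert "s3" (-13)).insert "s4" (-8)).insert "s5" 0
  let init := (first_cell_gap, "4\t-1\t9\t-11\t-8\t0\t\t\t\t\t\t\t\t\t", (5 : Int))
  ((PySem.List.pyRange 1 foil_quantity 1).foldl cellGapsStep init).2.1

-- ===== PORT B =====
def cellGapLine (i : Int) : String :=
  PySem.Int.toStr (4 + i) ++ "\t-1\t" ++ PySem.Int.toStr (10 + 2 * i) ++ "\t"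
    ++ PySem.Int.toStr (-11 - 2 * i) ++ "\t-8\t0" ++ "\t\t\t\t\t\t\t\t\t"

def cell_gaps_alt (foil_quantity : Int) : String :=
  PySem.Str.join "\n"
    ("4\t-1\t9\t-11\t-8\t0\t\t\t\t\t\t\t\t\t"
      :: (PySem.List.pyRange 1 foil_quantity 1).map cellGapLine)

-- ===== PRECONDITION & SPEC =====
def Spec_cell_gaps (foil_quantity : Int) (out : String) : Prop := out = cell_gaps_alt foil_quantity
instance (foil_quantity : Int) (out : String) : Decidable (Spec_cell_gaps foil_quantity out) := by unfold Spec_cell_gaps; infer_instance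

-- ===== CLAIM (what is proved, stated in full; the proofs are below) =====
def Claim_equal_cell_gaps : Prop := ∀ (foil_quantity : Int), Dom_cell_gaps foil_quantity → Spec_cell_gaps foil_quantity (cell_gaps foil_quantity)

-- ===== LEMMAS AND PROOFS =====

-- the dict state of A's loop just before processing gap index k (k = 1 on entry)
def dState (k : Int) : PySem.Dict String Int :=
  PySem.Dict.mk [("row", 4 + k), ("s1", -1), ("s2", 10 + 2 * k), ("s3", -11 - 2 * k),
    ("s4", -8), ("s5", 0)]

lemma join_absorb (s x : String) (l : List String) :
    PySem.Str.join "\n" ((s ++ ("\n" ++ x)) :: l)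
      = s ++ ("\n" ++ PySem.Str.join "\n" (x :: l)) := by
  apply String.toList_inj.mp
  cases l with
  | nil =>
      simp [PySem.Str.toList_join, PySem.Chars.join_singleton, String.toList_append]
  | cons y ys =>
      simp [PySem.Str.toList_join, PySem.Chars.join_cons_cons, String.toList_append]

lemma join_cons (s x : String) (l : List String) :
    PySem.Str.join "\n" (s :: x :: l) = s ++ ("\n" ++ PySem.Str.join "\n" (x :: l)) := by
  apply String.toList_inj.mp
  simp [PySem.Str.toList_join, PySem.Chars.join_cons_cons, String.toList_append]

lemma step_dState (k : Int) (s : String) (c : Int) (g : Int) :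
    cellGapsStep (dState k, s, c) g = (dState (k + 1), s ++ ("\n" ++ cellGapLine k), c + 1) := by
  simp only [cellGapsStep, dState, cellGapLine]
  simp [PySem.Dict.getD, PySem.Dict.get?, PySem.Dict.insert, pysem]
  refine ⟨⟨by ring, by ring, by ring⟩, ?_⟩
  apply String.toList_inj.mp
  simp [String.toList_append, show PySem.Int.toChars (-1) = ['-','1'] from rfl,
    show PySem.Int.toChars (-8) = ['-','8'] from rfl, show PySem.Int.toChars 0 = ['0'] from rfl]


lemma loop_eq (m : Nat) : ∀ (k : Int) (s : String) (c : Int),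
    ((PySem.List.pyRange k (k + m) 1).foldl cellGapsStep (dState k, s, c)).2.1
      = PySem.Str.join "\n" (s :: (PySem.List.pyRange k (k + m) 1).map cellGapLine) := by
  induction m with
  | zero =>
      intro k s c
      simp [pysem]
      apply String.toList_inj.mp
      simp [PySem.Str.toList_join, PySem.Chars.join_singleton]
  | succ m ih =>
      intro k s c
      have h : k < k + ((m : Nat) + 1 : Nat) := by push_cast; omega
      rw [PySem.List.pyRange_one_cons h, List.foldl_cons, step_dState, List.map_cons]
      have hb : k + ((m : Nat) + 1 : Nat) = (k + 1) + (m : Nat) := by push_cast; ring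
      rw [hb, ih (k + 1) (s ++ ("\n" ++ cellGapLine k)) (c + 1), join_absorb, join_cons]

-- ===== VERDICT (by name: the statement is the Claim_ definition above) =====
theorem cell_gaps_spec : Claim_equal_cell_gaps := by
  intro n _
  unfold Spec_cell_gaps cell_gaps cell_gaps_alt
  have hd : ((((((PySem.Dict.empty : PySem.Dict String Int).insert "row" 5).insert
      "s1" (-1)).insert "s2" 12).insert "s3" (-13)).insert "s4" (-8)).insert "s5" 0 = dState 1 := by
    decide
  by_cases hn : n ≤ 1
  · rw [PySem.List.pyRange_one_eq_nil hn]
    apply String.toList_inj.mp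
    simp [PySem.Str.toList_join, PySem.Chars.join_singleton]
  · have hm : n = 1 + ((n - 1).toNat : Int) := by omega
    simp only [hd]
    rw [hm]
    exact loop_eq (n - 1).toNat 1 _ 5
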